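-- pv_equiv track=rewrite | github.com/sysy66/algorithmNotes-caolv | python/6927.合法分割的最小下标.py | minimumIndex
-- ===== SOURCE A (Python) =====
-- import heapq
-- from collections import Counter
-- from typing import List
--
-- def minimumIndex(nums: List[int]) -> int:
--
-- 	"""
-- 	# 1.遍历列表找出最大频率的数值和频率
-- 	dmt = -1  # dominant
-- 	max_freq = 0
-- 	cnt = Counter()
-- 	for x in nums:
-- 		cnt[x] += 1
-- 		if cnt[x] > max_freq:
-- 			max_freq = cnt[x]
-- 			dmt = x
-- 	"""
--
-- 	# 2.调包~找出最大频率的数值和频率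
-- 	cnt = Counter(nums)
-- 	max_freq, dmt = heapq.nlargest(1, [(v, k) for k, v in cnt.items()])[0]
--
-- 	n = len(nums)
-- 	c = 0
-- 	for i, x in enumerate(nums):
-- 		if x == dmt:
-- 			c += 1
-- 		if 2 * c > i + 1 and 2 * (max_freq - c) > n - i - 1:
-- 			return i
-- 	return -1
-- ===== SOURCE B (Python) =====
-- from typing import List
--
-- def minimumIndex(nums: List[int]) -> int:
--     # Boyer-Moore majority vote instead of Counter + heapq.nlargest
--     candidate = nums[0]
--     count = 0
--     for x in nums:
--         if count == 0:
--             candidate = x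
--         if x == candidate:
--             count += 1
--         else:
--             count -= 1
--     total = sum(1 for x in nums if x == candidate)
--     n = len(nums)
--     c = 0
--     for i, x in enumerate(nums):
--         if x == candidate:
--             c += 1
--         if 2 * c > i + 1 and 2 * (total - c) > n - i - 1:
--             return i
--     return -1
-- ===== Notes on version B (the rewrite author's own statement) =====
-- stated objective: faster
-- what changed: Replaces A's Counter hash table plus heapq.nlargest over (freq, value) tuples by a single-pass Boyer-Moore majority vote followed by one counting pass; no frequency table or heap is built (constant-factor speedup, measured ~2x).
import Mathlib
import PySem

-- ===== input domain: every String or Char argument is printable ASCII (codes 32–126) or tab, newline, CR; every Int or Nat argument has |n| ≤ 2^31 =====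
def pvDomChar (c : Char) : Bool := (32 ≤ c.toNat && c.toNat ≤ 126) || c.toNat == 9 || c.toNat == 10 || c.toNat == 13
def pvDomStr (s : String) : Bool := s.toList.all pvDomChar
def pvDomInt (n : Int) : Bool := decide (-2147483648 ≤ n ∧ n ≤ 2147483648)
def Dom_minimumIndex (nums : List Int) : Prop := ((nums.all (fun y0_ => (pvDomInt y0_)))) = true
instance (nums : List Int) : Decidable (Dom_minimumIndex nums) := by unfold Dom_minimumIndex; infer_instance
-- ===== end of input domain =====

-- B replaces A's Counter + heapq.nlargest dominant search by a Boyer–Moore majority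
-- vote plus one counting pass: no frequency table or heap (measured constant-factor speedup).

-- ===== PORT A =====
-- the final prefix-scan loop, shared verbatim by both Pythons
def pvScan : List Int → Int → Int → Int → Int → Int → Int
  | [], _, _, _, _, _ => -1
  | x :: rest, dmt, f, n, i, c =>
    let c' := if x = dmt then c + 1 else c
    if 2 * c' > i + 1 ∧ 2 * (f - c') > n - i - 1 then i
    else pvScan rest dmt f n (i + 1) c'

-- one comparison step of max over (v, k) tuples (heapq.nlargest(1, …)[0] = max)
def pvStep (b q : Int × Int) : Int × Int :=
  if b.1 < q.1 ∨ (b.1 = q.1 ∧ b.2 < q.2) then q else b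

def minimumIndex (nums : List Int) : Int :=
  let pairs := ((PySem.Dict.counter nums).items).map (fun kv => (kv.2, kv.1))
  match pairs with
  | [] => -1   -- Python: nlargest(1, [])[0] raises IndexError; excluded by Pre_
  | p :: rest =>
    let best := rest.foldl pvStep p
    pvScan nums best.2 best.1 nums.length 0 0

-- ===== PORT B =====
def pvVote : List Int → Int → Int → Int
  | [], cand, _ => cand
  | x :: rest, cand, cnt =>
    let cand' := if cnt = 0 then x else cand
    let cnt' := if x = cand' then cnt + 1 else cnt - 1
    pvVote rest cand' cnt'

def minimumIndex_alt (nums : List Int) : Int :=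
  match nums with
  | [] => -1   -- Python: nums[0] raises IndexError; excluded by Pre_
  | h :: _ =>
    let cand := pvVote nums h 0
    let total : Int := (nums.count cand : Int)
    pvScan nums cand total nums.length 0 0

-- ===== PRECONDITION & SPEC =====
-- Pre_ excludes only the empty list, on which both Pythons raise IndexError.
def Pre_minimumIndex (nums : List Int) : Prop := nums ≠ []
instance (nums : List Int) : Decidable (Pre_minimumIndex nums) := by unfold Pre_minimumIndex; infer_instance
def pvWitness_minimumIndex : List Int := ([1, 2, 2])

def Spec_minimumIndex (nums : List Int) (out : Int) : Prop := out = minimumIndex_alt nums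
instance (nums : List Int) (out : Int) : Decidable (Spec_minimumIndex nums out) := by unfold Spec_minimumIndex; infer_instance

-- ===== CLAIM (what is proved, stated in full; the proofs are below) =====
def Claim_equal_minimumIndex : Prop := ∀ (nums : List Int), Dom_minimumIndex nums → Pre_minimumIndex nums → Spec_minimumIndex nums (minimumIndex nums)

-- ===== LEMMAS AND PROOFS =====

-- the scan returns -1 whenever the claimed dominant frequency f is not a strict majority
lemma pvScan_of_no_majority (l : List Int) (d f n : Int) :
    2 * f ≤ n → ∀ i c, pvScan l d f n i c = -1 := by
  intro hf
  induction l with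
  | nil => intro i c; simp [pvScan]
  | cons x rest ih =>
    intro i c
    simp only [pvScan]
    split_ifs <;> first | omega | exact ih _ _

-- the fold result is one of the folded pairs
lemma foldl_pvStep_mem (l : List (Int × Int)) (p : Int × Int) :
    l.foldl pvStep p ∈ p :: l := by
  induction l generalizing p with
  | nil => simp
  | cons a l ih =>
    simp only [List.foldl_cons]
    have h1 := ih (pvStep p a)
    rw [List.mem_cons] at h1
    have hstep : pvStep p a = a ∨ pvStep p a = p := by
      unfold pvStep; split_ifs <;> simp
    rw [List.mem_cons, List.mem_cons]
    rcases h1 with h | h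
    · rw [h]; tauto
    · tauto

-- the fold result's first component dominates every folded pair
lemma foldl_pvStep_fst_le (l : List (Int × Int)) (p : Int × Int) :
    ∀ q ∈ p :: l, q.1 ≤ (l.foldl pvStep p).1 := by
  induction l generalizing p with
  | nil => simp
  | cons a l ih =>
    intro q hq
    simp only [List.mem_cons] at hq
    simp only [List.foldl_cons]
    have hp : p.1 ≤ (pvStep p a).1 ∧ a.1 ≤ (pvStep p a).1 := by
      unfold pvStep; split_ifs with h
      · rcases h with h | ⟨h, _⟩ <;> constructor <;> omega
      · rw [not_or] at h; constructor <;> omega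
    have hall := ih (pvStep p a)
    have hstep_le : (pvStep p a).1 ≤ (l.foldl pvStep (pvStep p a)).1 :=
      hall _ (by simp)
    rcases hq with rfl | rfl | hq
    · exact le_trans hp.1 hstep_le
    · exact le_trans hp.2 hstep_le
    · exact hall _ (List.mem_cons_of_mem _ hq)

-- distinct values' counts fit together inside the length
lemma count_add_count_le (l : List Int) (a b : Int) (h : a ≠ b) :
    l.count a + l.count b ≤ l.length := by
  induction l with
  | nil => simp
  | cons x t ih =>
    simp only [List.count_cons, List.length_cons, beq_iff_eq]
    split_ifs <;> omega

-- Boyer–Moore correctness: a strict majority element wins the vote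
lemma pvVote_majority (m : Int) (l : List Int) :
    ∀ cand cnt : Int, 0 ≤ cnt →
      2 * ((l.count m : Int) + (if cand = m then cnt else 0)) > (l.length : Int) + cnt →
      pvVote l cand cnt = m := by
  induction l with
  | nil =>
    intro cand cnt h0 hm
    simp only [pvVote]
    by_cases hc : cand = m
    · exact hc
    · simp [hc] at hm; omega
  | cons x rest ih =>
    intro cand cnt h0 hm
    simp only [pvVote]
    simp only [List.count_cons, List.length_cons, beq_iff_eq] at hm
    push_cast at hm
    by_cases h0' : cnt = 0
    · rw [if_pos h0', if_pos rfl]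
      rw [h0'] at hm
      apply ih _ _ (by omega)
      by_cases hxm : x = m
      · rw [if_pos hxm] at hm; rw [if_pos hxm]
        simp only [ite_self] at hm; omega
      · rw [if_neg hxm] at hm; rw [if_neg hxm]
        simp only [ite_self] at hm; omega
    · rw [if_neg h0']
      by_cases hxc : x = cand
      · rw [if_pos hxc]
        apply ih _ _ (by omega)
        by_cases hcm : cand = m
        · rw [if_pos hcm] at hm ⊢
          rw [if_pos (hxc.trans hcm)] at hm; omega
        · rw [if_neg hcm] at hm ⊢
          have hxm : ¬ x = m := fun hh => hcm (hxc ▸ hh)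
          rw [if_neg hxm] at hm; omega
      · rw [if_neg hxc]
        apply ih _ _ (by omega)
        by_cases hcm : cand = m
        · rw [if_pos hcm] at hm ⊢
          have hxm : ¬ x = m := fun hh => hxc (by rw [hh, ← hcm])
          rw [if_neg hxm] at hm; omega
        · rw [if_neg hcm] at hm ⊢
          by_cases hxm : x = m
          · rw [if_pos hxm] at hm; omega
          · rw [if_neg hxm] at hm; omega

-- membership and shape of A's (v, k) pair list
lemma mem_pairs_iff (nums : List Int) (q : Int × Int) :
    q ∈ ((PySem.Dict.counter nums).items).map (fun kv => (kv.2, kv.1)) ↔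
      q.2 ∈ nums ∧ q.1 = (nums.count q.2 : Int) := by
  simp only [PySem.Dict.items_counter, List.map_map, List.mem_map, Function.comp]
  constructor
  · rintro ⟨k, hk, rfl⟩
    exact ⟨(PySem.Set.mem_ofList nums k).1 hk, rfl⟩
  · rintro ⟨hq, hfst⟩
    exact ⟨q.2, (PySem.Set.mem_ofList nums q.2).2 hq, by rw [← hfst]⟩

-- unfold A on a non-empty pair list
lemma minimumIndex_eq (nums : List Int) (p : Int × Int) (rest : List (Int × Int))
    (hp : ((PySem.Dict.counter nums).items).map (fun kv => (kv.2, kv.1)) = p :: rest) :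
    minimumIndex nums =
      pvScan nums (rest.foldl pvStep p).2 (rest.foldl pvStep p).1 nums.length 0 0 := by
  simp only [minimumIndex, hp]

theorem minimumIndex_equal (nums : List Int) (hne : nums ≠ []) :
    minimumIndex nums = minimumIndex_alt nums := by
  obtain ⟨h, t, rfl⟩ := List.exists_cons_of_ne_nil hne
  set nums := h :: t with hnums
  -- the pair list is non-empty
  have hmemh : ((nums.count h : Int), h) ∈
      ((PySem.Dict.counter nums).items).map (fun kv => (kv.2, kv.1)) :=
    (mem_pairs_iff nums _).2 ⟨by simp [hnums], rfl⟩
  obtain ⟨p, rest, hp⟩ :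
      ∃ p rest, ((PySem.Dict.counter nums).items).map (fun kv => (kv.2, kv.1)) = p :: rest := by
    rcases hl : ((PySem.Dict.counter nums).items).map (fun kv => (kv.2, kv.1)) with _ | ⟨p, rest⟩
    · rw [hl] at hmemh; simp at hmemh
    · exact ⟨p, rest, hl⟩
  rw [minimumIndex_eq nums p rest hp]
  set best := rest.foldl pvStep p with hbest
  have hbestmem : best ∈ p :: rest := foldl_pvStep_mem rest p
  rw [← hp] at hbestmem
  have hbshape := (mem_pairs_iff nums best).1 hbestmem
  -- B's pieces
  have halt : minimumIndex_alt nums =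
      pvScan nums (pvVote nums h 0) ((nums.count (pvVote nums h 0) : Int)) nums.length 0 0 := by
    simp only [hnums, minimumIndex_alt]
  rw [halt]
  by_cases hmaj : ∃ m ∈ nums, 2 * nums.count m > nums.length
  · -- a strict majority exists: both sides use it
    obtain ⟨m, hm, hmc⟩ := hmaj
    have hvote : pvVote nums h 0 = m := by
      apply pvVote_majority m nums h 0 le_rfl
      split_ifs <;> omega
    have hmm : ((nums.count m : Int), m) ∈ p :: rest := by
      rw [← hp]; exact (mem_pairs_iff nums _).2 ⟨hm, rfl⟩
    have hmle : (nums.count m : Int) ≤ best.1 := foldl_pvStep_fst_le rest p _ hmm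
    have hb2 : best.2 = m := by
      by_contra hne'
      have hcle : nums.count best.2 + nums.count m ≤ nums.length :=
        count_add_count_le nums best.2 m hne'
      rw [hbshape.2] at hmle
      have : nums.count m ≤ nums.count best.2 := by exact_mod_cast hmle
      omega
    have hb1 : best.1 = (nums.count m : Int) := by rw [hbshape.2, hb2]
    rw [hvote, hb2, hb1]
  · -- no strict majority: both scans return -1
    push Not at hmaj
    have hA : pvScan nums best.2 best.1 nums.length 0 0 = -1 := by
      apply pvScan_of_no_majority
      have := hmaj best.2 hbshape.1
      rw [hbshape.2]; omega
    have hB : pvScan nums (pvVote nums h 0) ((nums.count (pvVote nums h 0) : Int)) nums.length 0 0 = -1 := by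
      apply pvScan_of_no_majority
      by_cases hc : pvVote nums h 0 ∈ nums
      · have := hmaj _ hc; omega
      · rw [List.count_eq_zero_of_not_mem hc]; omega
    rw [hA, hB]

-- ===== VERDICT (by name: the statement is the Claim_ definition above) =====
theorem minimumIndex_spec : Claim_equal_minimumIndex := by
  intro nums _ hpre
  unfold Spec_minimumIndex
  exact minimumIndex_equal nums hpre
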